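-- pv_equiv track=rewrite | github.com/guoit/leetcode-python | code947MostStonesRemovedWithSameRowOrColumn.py | removeStones_WRONG
-- ===== SOURCE A (Python) =====
-- def removeStones_WRONG(stones):
--     """
--     :type stones: List[List[int]]
--     :rtype: int
--     """
--     # union find and union are wrong
--     def unionfind(X, Y, stones, i):
--         """
--         union find the root stone which connected to (x, y)
--         return the index of the root stone in list "stones"
--         """
--         x, y = stones[i]
--         if x in X:
--             i = X[x]
--             Y[y] = i
--         elif y in Y:
--             i = Y[y]
--             X[x] = i
--         else:
--             X[x] = i
--             Y[y] = i
--
--         return i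
--
--     X, Y = {}, {}   # X and Y have keys of x and y coordinates, values of root stones' indices
--     N, remain = len(stones), 0
--     for i in range(N):
--         j = unionfind(X, Y, stones, i)
--         if j == i:
--             remain += 1
--
--     return N - remain
-- ===== SOURCE B (Python) =====
-- def removeStones_WRONG(stones):
--     # Pass 1: record the index of the first stone in each row and each column.
--     first_x, first_y = {}, {}
--     for i, (x, y) in enumerate(stones):
--         if x not in first_x:
--             first_x[x] = i
--         if y not in first_y:
--             first_y[y] = i
--     # Pass 2: a stone stays iff it is the first occurrence of both its row and column.
--     remain = sum(1 for i, (x, y) in enumerate(stones)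
--                  if first_x[x] == i and first_y[y] == i)
--     return len(stones) - remain
-- ===== Notes on version B (the rewrite author's own statement) =====
-- stated objective: simpler
-- what changed: Replaces the dict-of-root-indices pseudo-union-find (three-way branching, cross-updating two dicts) with two plain passes: one building first-occurrence indices per row/column, one counting stones that are the first in both their row and column.
import Mathlib
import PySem

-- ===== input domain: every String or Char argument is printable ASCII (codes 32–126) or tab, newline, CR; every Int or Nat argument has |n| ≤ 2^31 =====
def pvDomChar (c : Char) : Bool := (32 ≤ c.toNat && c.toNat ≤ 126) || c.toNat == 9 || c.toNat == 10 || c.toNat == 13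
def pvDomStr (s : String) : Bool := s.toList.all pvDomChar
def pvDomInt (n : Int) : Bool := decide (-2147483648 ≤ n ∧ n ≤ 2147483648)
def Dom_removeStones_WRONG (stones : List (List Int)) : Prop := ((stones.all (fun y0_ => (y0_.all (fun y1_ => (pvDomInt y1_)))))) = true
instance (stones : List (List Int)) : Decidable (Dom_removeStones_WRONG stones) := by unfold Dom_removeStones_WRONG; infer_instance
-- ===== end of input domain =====

-- B replaces A's dict-of-root-indices pseudo-union-find with two plain passes
-- (first-occurrence indices per row/column, then a count); same O(n) cost, simpler.


-- ===== PORT A =====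
-- the body of A's for-loop over `i in range(N)` (read via enumerate; exact under Pre_,
-- where every stone has exactly two coordinates): state (X, Y, remain)
def stepA (acc : PySem.Dict Int Int × PySem.Dict Int Int × Int) (p : Int × List Int) :
    PySem.Dict Int Int × PySem.Dict Int Int × Int :=
  let X := acc.1
  let Y := acc.2.1
  let remain := acc.2.2
  let i := p.1
  let x := PySem.List.pyGetD p.2 0 0
  let y := PySem.List.pyGetD p.2 1 0
  -- unionfind(X, Y, stones, i): returns new X, new Y and the returned index j
  let uf : PySem.Dict Int Int × PySem.Dict Int Int × Int :=
    match X.get? x with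
    | some j => (X, Y.insert y j, j)
    | none =>
      match Y.get? y with
      | some j => (X.insert x j, Y, j)
      | none => (X.insert x i, Y.insert y i, i)
  (uf.1, uf.2.1, if uf.2.2 == i then remain + 1 else remain)

def removeStones_WRONG (stones : List (List Int)) : Int :=
  let N : Int := stones.length
  let fin := (PySem.List.enumerate stones 0).foldl stepA (PySem.Dict.empty, PySem.Dict.empty, 0)
  N - fin.2.2

-- ===== PORT B =====
-- pass 1 body: record first-occurrence index of each row / column
def stepB (acc : PySem.Dict Int Int × PySem.Dict Int Int) (p : Int × List Int) :
    PySem.Dict Int Int × PySem.Dict Int Int :=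
  let x := PySem.List.pyGetD p.2 0 0
  let y := PySem.List.pyGetD p.2 1 0
  ((if acc.1.contains x then acc.1 else acc.1.insert x p.1),
   (if acc.2.contains y then acc.2 else acc.2.insert y p.1))

def removeStones_WRONG_alt (stones : List (List Int)) : Int :=
  let fd := (PySem.List.enumerate stones 0).foldl stepB (PySem.Dict.empty, PySem.Dict.empty)
  let remain : Int :=
    ((PySem.List.enumerate stones 0).map (fun p =>
      if fd.1.get? (PySem.List.pyGetD p.2 0 0) == some p.1
         && fd.2.get? (PySem.List.pyGetD p.2 1 0) == some p.1
      then (1 : Int) else 0)).sum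
  (stones.length : Int) - remain

-- ===== PRECONDITION & SPEC =====
-- Pre_ excludes stones that are not [x, y] pairs: Python's `x, y = stones[i]`
-- (A) and `for i, (x, y) in enumerate(stones)` (B) both raise ValueError there.
def Pre_removeStones_WRONG (stones : List (List Int)) : Prop :=
  ∀ s ∈ stones, s.length = 2
instance (stones : List (List Int)) : Decidable (Pre_removeStones_WRONG stones) := by
  unfold Pre_removeStones_WRONG; infer_instance

def pvWitness_removeStones_WRONG : List (List Int) := [[0, 0], [0, 1], [2, 1], [3, 3]]

def Spec_removeStones_WRONG (stones : List (List Int)) (out : Int) : Prop := out = removeStones_WRONG_alt stones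
instance (stones : List (List Int)) (out : Int) : Decidable (Spec_removeStones_WRONG stones out) := by unfold Spec_removeStones_WRONG; infer_instance

-- ===== CLAIM (what is proved, stated in full; the proofs are below) =====
def Claim_equal_removeStones_WRONG : Prop := ∀ (stones : List (List Int)), Dom_removeStones_WRONG stones → Pre_removeStones_WRONG stones → Spec_removeStones_WRONG stones (removeStones_WRONG stones)

-- ===== LEMMAS AND PROOFS =====

-- the common specification: number of stones whose row AND column are both unseen,
-- scanning left to right with seen-rows sx and seen-columns sy
def fresh : List Int → List Int → List (List Int) → Int
  | _, _, [] => 0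
  | sx, sy, s :: rest =>
    let x := PySem.List.pyGetD s 0 0
    let y := PySem.List.pyGetD s 1 0
    (if x ∉ sx ∧ y ∉ sy then 1 else 0) + fresh (x :: sx) (y :: sy) rest

lemma loopA (rest : List (List Int)) :
    ∀ (i : Int) (sx sy : List Int) (X Y : PySem.Dict Int Int) (r : Int),
    (∀ x, (X.get? x).isSome = decide (x ∈ sx)) →
    (∀ x v, X.get? x = some v → v < i) →
    (∀ y, (Y.get? y).isSome = decide (y ∈ sy)) →
    (∀ y v, Y.get? y = some v → v < i) →
    ((PySem.List.enumerate rest i).foldl stepA (X, Y, r)).2.2 = r + fresh sx sy rest := by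
  induction rest with
  | nil => intros; simp [PySem.List.enumerate_nil, fresh]
  | cons s rest ih =>
    intro i sx sy X Y r hX hXv hY hYv
    rw [PySem.List.enumerate_cons]
    set x := PySem.List.pyGetD s 0 0 with hx_def
    set y := PySem.List.pyGetD s 1 0 with hy_def
    simp only [List.foldl_cons]
    rcases hgx : X.get? x with _ | j
    · rcases hgy : Y.get? y with _ | j
      · -- both fresh: j = i, remain increments
        have hxmem : x ∉ sx := by
          have := hX x; rw [hgx] at this; simpa using this.symm
        have hymem : y ∉ sy := by
          have := hY y; rw [hgy] at this; simpa using this.symm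
        have hstep : stepA (X, Y, r) (i, s) = (X.insert x i, Y.insert y i, r + 1) := by
          simp [stepA, ← hx_def, ← hy_def, hgx, hgy]
        rw [hstep, ih (i + 1) (x :: sx) (y :: sy) _ _ _ ?_ ?_ ?_ ?_]
        · simp [fresh, ← hx_def, ← hy_def, hxmem, hymem]; ring
        · intro x'
          by_cases h : x' = x
          · subst h; simp [PySem.Dict.get?_insert_self]
          · rw [PySem.Dict.get?_insert_of_ne _ _ h]
            simp [hX x', h]
        · intro x' v hv
          by_cases h : x' = x
          · subst h; rw [PySem.Dict.get?_insert_self] at hv; simp at hv; omega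
          · rw [PySem.Dict.get?_insert_of_ne _ _ h] at hv
            have := hXv x' v hv; omega
        · intro y'
          by_cases h : y' = y
          · subst h; simp [PySem.Dict.get?_insert_self]
          · rw [PySem.Dict.get?_insert_of_ne _ _ h]
            simp [hY y', h]
        · intro y' v hv
          by_cases h : y' = y
          · subst h; rw [PySem.Dict.get?_insert_self] at hv; simp at hv; omega
          · rw [PySem.Dict.get?_insert_of_ne _ _ h] at hv
            have := hYv y' v hv; omega
      · -- y seen: j = Y[y] < i, X[x] := j, remain unchanged
        have hymem : y ∈ sy := by
          have := hY y; rw [hgy] at this; simpa using this.symm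
        have hj : j < i := hYv y j hgy
        have hstep : stepA (X, Y, r) (i, s) = (X.insert x j, Y, r) := by
          simp [stepA, ← hx_def, ← hy_def, hgx, hgy]; omega
        rw [hstep, ih (i + 1) (x :: sx) (y :: sy) _ _ _ ?_ ?_ ?_ ?_]
        · simp [fresh, ← hx_def, ← hy_def, hymem]
        · intro x'
          by_cases h : x' = x
          · subst h; simp [PySem.Dict.get?_insert_self]
          · rw [PySem.Dict.get?_insert_of_ne _ _ h]
            simp [hX x', h]
        · intro x' v hv
          by_cases h : x' = x
          · subst h; rw [PySem.Dict.get?_insert_self] at hv; simp at hv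
            omega
          · rw [PySem.Dict.get?_insert_of_ne _ _ h] at hv
            have := hXv x' v hv; omega
        · intro y'
          by_cases h : y' = y
          · subst h; simp [hgy]
          · simp [hY y', h]
        · intro y' v hv
          have := hYv y' v hv; omega
    · -- x seen: j = X[x] < i, Y[y] := j, remain unchanged
      have hxmem : x ∈ sx := by
        have := hX x; rw [hgx] at this; simpa using this.symm
      have hj : j < i := hXv x j hgx
      have hstep : stepA (X, Y, r) (i, s) = (X, Y.insert y j, r) := by
        simp [stepA, ← hx_def, ← hy_def, hgx]; omega
      rw [hstep, ih (i + 1) (x :: sx) (y :: sy) _ _ _ ?_ ?_ ?_ ?_]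
      · simp [fresh, ← hx_def, ← hy_def, hxmem]
      · intro x'
        by_cases h : x' = x
        · subst h; simp [hgx]
        · simp [hX x', h]
      · intro x' v hv
        have := hXv x' v hv; omega
      · intro y'
        by_cases h : y' = y
        · subst h; simp [PySem.Dict.get?_insert_self]
        · rw [PySem.Dict.get?_insert_of_ne _ _ h]
          simp [hY y', h]
      · intro y' v hv
        by_cases h : y' = y
        · subst h; rw [PySem.Dict.get?_insert_self] at hv; simp at hv
          omega
        · rw [PySem.Dict.get?_insert_of_ne _ _ h] at hv
          have := hYv y' v hv; omega

-- pass 1 never overwrites: a key already present keeps its value (row component)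
lemma buildB_preserve_fst (rest : List (List Int)) :
    ∀ (i : Int) (fx fy : PySem.Dict Int Int) (x : Int), (fx.get? x).isSome →
    (((PySem.List.enumerate rest i).foldl stepB (fx, fy)).1).get? x = fx.get? x := by
  induction rest with
  | nil => intros; simp [PySem.List.enumerate_nil]
  | cons s rest ih =>
    intro i fx fy x hx
    rw [PySem.List.enumerate_cons]
    simp only [List.foldl_cons]
    set x0 := PySem.List.pyGetD s 0 0
    have hfst : (stepB (fx, fy) (i, s)).1 =
        if fx.contains x0 then fx else fx.insert x0 i := rfl
    by_cases hc : fx.contains x0 = true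
    · have : stepB (fx, fy) (i, s) = ((stepB (fx, fy) (i, s)).1, (stepB (fx, fy) (i, s)).2) := rfl
      rw [this, hfst, if_pos hc]
      exact ih _ _ _ x hx
    · have hne : x ≠ x0 := by
        intro h; subst h
        rw [PySem.Dict.contains_eq_isSome_get?, hx] at hc; exact hc rfl
      have : stepB (fx, fy) (i, s) = ((stepB (fx, fy) (i, s)).1, (stepB (fx, fy) (i, s)).2) := rfl
      rw [this, hfst, if_neg hc]
      rw [ih _ _ _ x (by rw [PySem.Dict.get?_insert_of_ne _ _ hne]; exact hx)]
      exact PySem.Dict.get?_insert_of_ne _ _ hne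

-- same for the column component
lemma buildB_preserve_snd (rest : List (List Int)) :
    ∀ (i : Int) (fx fy : PySem.Dict Int Int) (y : Int), (fy.get? y).isSome →
    (((PySem.List.enumerate rest i).foldl stepB (fx, fy)).2).get? y = fy.get? y := by
  induction rest with
  | nil => intros; simp [PySem.List.enumerate_nil]
  | cons s rest ih =>
    intro i fx fy y hy
    rw [PySem.List.enumerate_cons]
    simp only [List.foldl_cons]
    set y0 := PySem.List.pyGetD s 1 0
    have hsnd : (stepB (fx, fy) (i, s)).2 =
        if fy.contains y0 then fy else fy.insert y0 i := rfl
    by_cases hc : fy.contains y0 = true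
    · have : stepB (fx, fy) (i, s) = ((stepB (fx, fy) (i, s)).1, (stepB (fx, fy) (i, s)).2) := rfl
      rw [this, hsnd, if_pos hc]
      exact ih _ _ _ y hy
    · have hne : y ≠ y0 := by
        intro h; subst h
        rw [PySem.Dict.contains_eq_isSome_get?, hy] at hc; exact hc rfl
      have : stepB (fx, fy) (i, s) = ((stepB (fx, fy) (i, s)).1, (stepB (fx, fy) (i, s)).2) := rfl
      rw [this, hsnd, if_neg hc]
      rw [ih _ _ _ y (by rw [PySem.Dict.get?_insert_of_ne _ _ hne]; exact hy)]
      exact PySem.Dict.get?_insert_of_ne _ _ hne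

-- pass 2 over the suffix, judged against the dicts pass 1 builds from that suffix
lemma loopB (rest : List (List Int)) :
    ∀ (i : Int) (sx sy : List Int) (fx fy : PySem.Dict Int Int),
    (∀ x, (fx.get? x).isSome = decide (x ∈ sx)) →
    (∀ x v, fx.get? x = some v → v < i) →
    (∀ y, (fy.get? y).isSome = decide (y ∈ sy)) →
    (∀ y v, fy.get? y = some v → v < i) →
    ((PySem.List.enumerate rest i).map (fun p =>
      if ((PySem.List.enumerate rest i).foldl stepB (fx, fy)).1.get? (PySem.List.pyGetD p.2 0 0) == some p.1
         && ((PySem.List.enumerate rest i).foldl stepB (fx, fy)).2.get? (PySem.List.pyGetD p.2 1 0) == some p.1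
      then (1 : Int) else 0)).sum = fresh sx sy rest := by
  induction rest with
  | nil => intros; simp [PySem.List.enumerate_nil, fresh]
  | cons s rest ih =>
    intro i sx sy fx fy hX hXv hY hYv
    rw [PySem.List.enumerate_cons]
    simp only [List.foldl_cons, List.map_cons, List.sum_cons]
    set x := PySem.List.pyGetD s 0 0 with hx_def
    set y := PySem.List.pyGetD s 1 0 with hy_def
    set fx1 := (stepB (fx, fy) (i, s)).1 with hfx1
    set fy1 := (stepB (fx, fy) (i, s)).2 with hfy1
    have hpair : stepB (fx, fy) (i, s) = (fx1, fy1) := rfl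
    simp only [hpair]
    -- the row/column dicts after step i contain x and y
    have hfx1x : fx1.get? x = if x ∈ sx then fx.get? x else some i := by
      rw [hfx1]
      show (if fx.contains x then fx else fx.insert x i).get? x = _
      rw [PySem.Dict.contains_eq_isSome_get?, hX x]
      by_cases h : x ∈ sx
      · simp [h]
      · simp [h, PySem.Dict.get?_insert_self]
    have hfy1y : fy1.get? y = if y ∈ sy then fy.get? y else some i := by
      rw [hfy1]
      show (if fy.contains y then fy else fy.insert y i).get? y = _
      rw [PySem.Dict.contains_eq_isSome_get?, hY y]
      by_cases h : y ∈ sy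
      · simp [h]
      · simp [h, PySem.Dict.get?_insert_self]
    have hinvX1 : ∀ x', (fx1.get? x').isSome = decide (x' ∈ x :: sx) := by
      intro x'
      rw [hfx1]
      show ((if fx.contains x then fx else fx.insert x i).get? x').isSome = _
      rw [PySem.Dict.contains_eq_isSome_get?, hX x]
      by_cases hm : x ∈ sx
      · rw [if_pos (by simp [hm])]
        by_cases h : x' = x
        · subst h; simp [hX x, hm]
        · simp [hX x', h]
      · rw [if_neg (by simp [hm])]
        by_cases h : x' = x
        · subst h; simp [PySem.Dict.get?_insert_self]
        · rw [PySem.Dict.get?_insert_of_ne _ _ h]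
          simp [hX x', h]
    have hinvY1 : ∀ y', (fy1.get? y').isSome = decide (y' ∈ y :: sy) := by
      intro y'
      rw [hfy1]
      show ((if fy.contains y then fy else fy.insert y i).get? y').isSome = _
      rw [PySem.Dict.contains_eq_isSome_get?, hY y]
      by_cases hm : y ∈ sy
      · rw [if_pos (by simp [hm])]
        by_cases h : y' = y
        · subst h; simp [hY y, hm]
        · simp [hY y', h]
      · rw [if_neg (by simp [hm])]
        by_cases h : y' = y
        · subst h; simp [PySem.Dict.get?_insert_self]
        · rw [PySem.Dict.get?_insert_of_ne _ _ h]
          simp [hY y', h]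
    have hvalX1 : ∀ x' v, fx1.get? x' = some v → v < i + 1 := by
      intro x' v hv
      rw [hfx1] at hv
      by_cases hc : fx.contains x = true
      · simp only [stepB, ← hx_def, ← hy_def] at hv; rw [if_pos hc] at hv
        have := hXv x' v hv; omega
      · simp only [stepB, ← hx_def, ← hy_def] at hv; rw [if_neg hc] at hv
        by_cases h : x' = x
        · subst h; rw [PySem.Dict.get?_insert_self] at hv; simp at hv; omega
        · rw [PySem.Dict.get?_insert_of_ne _ _ h] at hv
          have := hXv x' v hv; omega
    have hvalY1 : ∀ y' v, fy1.get? y' = some v → v < i + 1 := by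
      intro y' v hv
      rw [hfy1] at hv
      by_cases hc : fy.contains y = true
      · simp only [stepB, ← hx_def, ← hy_def] at hv; rw [if_pos hc] at hv
        have := hYv y' v hv; omega
      · simp only [stepB, ← hx_def, ← hy_def] at hv; rw [if_neg hc] at hv
        by_cases h : y' = y
        · subst h; rw [PySem.Dict.get?_insert_self] at hv; simp at hv; omega
        · rw [PySem.Dict.get?_insert_of_ne _ _ h] at hv
          have := hYv y' v hv; omega
    -- head indicator: equals 1 iff both coordinates are fresh
    have hheadX : (((PySem.List.enumerate rest (i + 1)).foldl stepB (fx1, fy1)).1).get? x = fx1.get? x :=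
      buildB_preserve_fst rest (i + 1) fx1 fy1 x (by rw [hinvX1 x]; simp)
    have hheadY : (((PySem.List.enumerate rest (i + 1)).foldl stepB (fx1, fy1)).2).get? y = fy1.get? y :=
      buildB_preserve_snd rest (i + 1) fx1 fy1 y (by rw [hinvY1 y]; simp)
    have hhead : (if (((PySem.List.enumerate rest (i + 1)).foldl stepB (fx1, fy1)).1.get? x == some i)
         && (((PySem.List.enumerate rest (i + 1)).foldl stepB (fx1, fy1)).2.get? y == some i)
        then (1 : Int) else 0) = (if x ∉ sx ∧ y ∉ sy then 1 else 0) := by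
      rw [hheadX, hheadY, hfx1x, hfy1y]
      by_cases hmx : x ∈ sx
      · rcases Option.isSome_iff_exists.mp (by rw [hX x]; simpa using hmx) with ⟨v, hv⟩
        have hvi : v < i := hXv x v hv
        simp [hmx, hv]; omega
      · by_cases hmy : y ∈ sy
        · rcases Option.isSome_iff_exists.mp (by rw [hY y]; simpa using hmy) with ⟨w, hw⟩
          have hwi : w < i := hYv y w hw
          simp [hmx, hmy, hw]; omega
        · simp [hmx, hmy]
    rw [hhead, ih (i + 1) (x :: sx) (y :: sy) fx1 fy1 hinvX1 hvalX1 hinvY1 hvalY1]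
    simp [fresh, ← hx_def, ← hy_def]

-- ===== VERDICT (by name: the statement is the Claim_ definition above) =====
theorem removeStones_WRONG_spec : Claim_equal_removeStones_WRONG := by
  intro stones _ _
  show removeStones_WRONG stones = removeStones_WRONG_alt stones
  have hA : removeStones_WRONG stones = (stones.length : Int) - fresh [] [] stones := by
    have h0 := loopA stones 0 [] [] PySem.Dict.empty PySem.Dict.empty 0
      (by intro x; simp [PySem.Dict.get?_empty])
      (by intro x v h; simp [PySem.Dict.get?_empty] at h)
      (by intro y; simp [PySem.Dict.get?_empty])
      (by intro y v h; simp [PySem.Dict.get?_empty] at h)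
    calc removeStones_WRONG stones
        = (stones.length : Int) -
            ((PySem.List.enumerate stones 0).foldl stepA
              (PySem.Dict.empty, PySem.Dict.empty, 0)).2.2 := rfl
      _ = (stones.length : Int) - fresh [] [] stones := by rw [h0]; ring
  have hB : removeStones_WRONG_alt stones = (stones.length : Int) - fresh [] [] stones := by
    have h0 := loopB stones 0 [] [] PySem.Dict.empty PySem.Dict.empty
      (by intro x; simp [PySem.Dict.get?_empty])
      (by intro x v h; simp [PySem.Dict.get?_empty] at h)
      (by intro y; simp [PySem.Dict.get?_empty])
      (by intro y v h; simp [PySem.Dict.get?_empty] at h)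
    calc removeStones_WRONG_alt stones
        = (stones.length : Int) -
            ((PySem.List.enumerate stones 0).map (fun p =>
              if ((PySem.List.enumerate stones 0).foldl stepB (PySem.Dict.empty, PySem.Dict.empty)).1.get? (PySem.List.pyGetD p.2 0 0) == some p.1
                 && ((PySem.List.enumerate stones 0).foldl stepB (PySem.Dict.empty, PySem.Dict.empty)).2.get? (PySem.List.pyGetD p.2 1 0) == some p.1
              then (1 : Int) else 0)).sum := rfl
      _ = (stones.length : Int) - fresh [] [] stones := by rw [h0]
  rw [hA, hB]
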